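-- pv_equiv track=rewrite | github.com/PuffBear/turnsports-poker-ai | src/poker/abstraction/card_abstraction.py | _combo_index
-- ===== SOURCE A (Python) =====
-- def _combo_index(high_rank: int, low_rank: int) -> int:
--     """
--     Compute index for non-pair combinations.
--
--     Maps (high, low) to 1-78:
--     - (14, 13) -> 1  (AK)
--     - (14, 12) -> 2  (AQ)
--     - ...
--     - (4, 3) -> 77   (43)
--     - (3, 2) -> 78   (32)
--
--     Formula:
--     - For each high card from Ace to 4, there are (high_rank - 2) possible low cards
--     - AK: 14, 13 -> 1
--     - AQ: 14, 12 -> 2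
--     - ...
--     - 32: 3, 2 -> 78
--     """
--     assert high_rank > low_rank, "high_rank must be > low_rank"
--
--     # Number of combinations from higher high_ranks
--     # e.g., for Q (12), we have all combos from A (14) and K (13)
--     combos_from_higher = 0
--     for r in range(14, high_rank, -1):
--         combos_from_higher += (r - 2)  # Number of valid low cards for rank r
--
--     # Position within current high card group
--     # e.g., AK is first (13), AQ is second (12), etc.
--     position_in_group = (high_rank - low_rank)
--
--     index = combos_from_higher + position_in_group
--
--     assert 1 <= index <= 78, f"Invalid combo index: {index} for ({high_rank}, {low_rank})"
--     return index
-- ===== SOURCE B (Python) =====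
-- def _combo_index(high_rank: int, low_rank: int) -> int:
--     assert high_rank > low_rank, "high_rank must be > low_rank"
--
--     # Closed form for sum_{r=high_rank+1}^{14} (r - 2); empty sum when high_rank >= 14.
--     combos_from_higher = (14 - high_rank) * (high_rank + 11) // 2 if high_rank < 14 else 0
--
--     index = combos_from_higher + (high_rank - low_rank)
--
--     assert 1 <= index <= 78, f"Invalid combo index: {index} for ({high_rank}, {low_rank})"
--     return index
-- ===== Notes on version B (the rewrite author's own statement) =====
-- stated objective: simpler
-- what changed: Replaced A's countdown summation loop over range(14, high_rank, -1) by the closed-form arithmetic-series formula (14-high_rank)*(high_rank+11)//2 (guarded by high_rank < 14 for the empty range).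
import Mathlib
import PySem

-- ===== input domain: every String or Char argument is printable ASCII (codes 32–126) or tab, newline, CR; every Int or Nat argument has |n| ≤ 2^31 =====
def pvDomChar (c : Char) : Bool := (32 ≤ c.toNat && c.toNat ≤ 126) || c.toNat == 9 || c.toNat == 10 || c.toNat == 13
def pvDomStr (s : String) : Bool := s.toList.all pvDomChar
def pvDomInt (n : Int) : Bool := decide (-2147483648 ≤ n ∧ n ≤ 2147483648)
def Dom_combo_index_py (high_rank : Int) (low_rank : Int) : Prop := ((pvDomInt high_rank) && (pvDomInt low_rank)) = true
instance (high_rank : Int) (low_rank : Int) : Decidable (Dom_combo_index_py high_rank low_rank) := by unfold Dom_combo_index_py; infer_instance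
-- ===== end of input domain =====

-- B replaces A's countdown summation loop by the closed-form triangular-number formula; one honest line: closed form instead of a loop.

-- ===== PORT A =====
-- literal port of A's loop: for r in range(14, high_rank, -1): combos += (r - 2)
def combo_index_py (high_rank : Int) (low_rank : Int) : Int :=
  let combos_from_higher :=
    (PySem.List.pyRange 14 high_rank (-1)).foldl (fun acc r => acc + (r - 2)) 0
  let position_in_group := high_rank - low_rank
  combos_from_higher + position_in_group

-- ===== PORT B =====
def combo_index_py_alt (high_rank : Int) (low_rank : Int) : Int :=
  let combos_from_higher :=
    if high_rank < 14 then PySem.Int.floordiv ((14 - high_rank) * (high_rank + 11)) 2 else 0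
  combos_from_higher + (high_rank - low_rank)

-- ===== PRECONDITION & SPEC =====
-- Pre_: exactly the inputs where Python A's two asserts pass (it raises AssertionError otherwise);
-- the index expression is written in closed form (the dividend is always even, so / is exact).
def Pre_combo_index_py (high_rank : Int) (low_rank : Int) : Prop :=
  high_rank > low_rank ∧
  1 ≤ (if high_rank < 14 then ((14 - high_rank) * (high_rank + 11)) / 2 else 0) + (high_rank - low_rank) ∧
  (if high_rank < 14 then ((14 - high_rank) * (high_rank + 11)) / 2 else 0) + (high_rank - low_rank) ≤ 78
instance (high_rank : Int) (low_rank : Int) : Decidable (Pre_combo_index_py high_rank low_rank) := by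
  unfold Pre_combo_index_py; infer_instance

def pvWitness_combo_index_py : Int × Int := (14, 13)

def Spec_combo_index_py (high_rank : Int) (low_rank : Int) (out : Int) : Prop := out = combo_index_py_alt high_rank low_rank
instance (high_rank : Int) (low_rank : Int) (out : Int) : Decidable (Spec_combo_index_py high_rank low_rank out) := by unfold Spec_combo_index_py; infer_instance

-- ===== CLAIM (what is proved, stated in full; the proofs are below) =====
def Claim_equal_combo_index_py : Prop := ∀ (high_rank : Int) (low_rank : Int), Dom_combo_index_py high_rank low_rank → Pre_combo_index_py high_rank low_rank → Spec_combo_index_py high_rank low_rank (combo_index_py high_rank low_rank)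

-- ===== LEMMAS AND PROOFS =====

-- twice the countdown sum, in closed form (stated doubled to avoid division)
theorem pv_sum_countdown (n : Nat) : ∀ (b init : Int),
    2 * ((PySem.List.pyRange (b + n) b (-1)).foldl (fun acc r => acc + (r - 2)) init)
      = 2 * init + n * (2 * b + n - 3) := by
  induction n with
  | zero =>
    intro b init
    simp [PySem.List.pyRange_neg_one_eq_nil (le_refl b)]
  | succ n ih =>
    intro b init
    have hlt : b < b + (n + 1 : Nat) := by push_cast; omega
    rw [PySem.List.pyRange_neg_one_cons hlt]
    have : (b + (n + 1 : Nat)) - 1 = b + (n : Nat) := by push_cast; ring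
    simp only [List.foldl_cons, this]
    rw [ih b (init + (b + (n + 1 : Nat) - 2))]
    push_cast
    ring

theorem pv_loop_closed (h : Int) :
    (PySem.List.pyRange 14 h (-1)).foldl (fun acc r => acc + (r - 2)) 0
      = if h < 14 then PySem.Int.floordiv ((14 - h) * (h + 11)) 2 else 0 := by
  by_cases hc : h < 14
  · have hn : (14 : Int) = h + ((14 - h).toNat : Int) := by omega
    have hs := pv_sum_countdown (14 - h).toNat h 0
    rw [← hn] at hs
    have hval : ((14 - h).toNat : Int) = 14 - h := by omega
    rw [hval] at hs
    have h2 : (14 - h) * (h + 11) =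
        2 * ((PySem.List.pyRange 14 h (-1)).foldl (fun acc r => acc + (r - 2)) 0) := by
      rw [hs]; ring
    simp only [if_pos hc, PySem.Int.floordiv, h2]
    rw [Int.mul_fdiv_cancel_left _ (by norm_num)]
  · rw [PySem.List.pyRange_neg_one_eq_nil (by omega)]
    simp [hc]

-- ===== VERDICT (by name: the statement is the Claim_ definition above) =====
theorem combo_index_py_spec : Claim_equal_combo_index_py := by
  intro high_rank low_rank _ _
  unfold Spec_combo_index_py combo_index_py combo_index_py_alt
  simp only [pv_loop_closed high_rank]
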